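-- pv_equiv track=rewrite | github.com/AysajanE/moltbook-persistence | analysis/10_results_presentation_category4.py | ordered_category_labels
-- ===== SOURCE A (Python) =====
-- DEFAULT_CATEGORY_ORDER = (
--     "Social/Casual",
--     "Philosophy/Meta",
--     "Builder/Technical",
--     "Creative",
--     "Spam/Low-Signal",
--     "Other",
-- )
--
-- REQUIRED_KEY_CATEGORIES = ("Social/Casual", "Philosophy/Meta")
--
-- def ordered_category_labels(observed_labels: set[str]) -> list[str]:
--     out: list[str] = []
--     observed = {label for label in observed_labels if isinstance(label, str) and label.strip()}
--     for label in DEFAULT_CATEGORY_ORDER: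
--         if label in observed or label in REQUIRED_KEY_CATEGORIES:
--             out.append(label)
--     out.extend(sorted(observed.difference(out)))
--     return out
-- ===== SOURCE B (Python) =====
-- DEFAULT_CATEGORY_ORDER = (
--     "Social/Casual",
--     "Philosophy/Meta",
--     "Builder/Technical",
--     "Creative",
--     "Spam/Low-Signal",
--     "Other",
-- )
--
-- REQUIRED_KEY_CATEGORIES = ("Social/Casual", "Philosophy/Meta")
--
-- def ordered_category_labels(observed_labels):
--     observed = {label for label in observed_labels if isinstance(label, str) and label.strip()}
--     rank = {cat: i for i, cat in enumerate(DEFAULT_CATEGORY_ORDER)}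
--     full = observed | set(REQUIRED_KEY_CATEGORIES)
--     # known categories first in fixed precedence, then the rest alphabetically,
--     # via one composite string key: "0<rank>" sorts before "1<label>"
--     return sorted(full, key=lambda l: "0%d" % rank[l] if l in rank else "1" + l)
-- ===== Notes on version B (the rewrite author's own statement) =====
-- stated objective: simpler
-- what changed: Replaces A's two-phase construction (scan the fixed category order appending hits, then extend with the sorted leftover labels) by a single sort of the combined set observed | required under one composite string key that puts known categories first in fixed precedence and the rest alphabetically.
import Mathlib
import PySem

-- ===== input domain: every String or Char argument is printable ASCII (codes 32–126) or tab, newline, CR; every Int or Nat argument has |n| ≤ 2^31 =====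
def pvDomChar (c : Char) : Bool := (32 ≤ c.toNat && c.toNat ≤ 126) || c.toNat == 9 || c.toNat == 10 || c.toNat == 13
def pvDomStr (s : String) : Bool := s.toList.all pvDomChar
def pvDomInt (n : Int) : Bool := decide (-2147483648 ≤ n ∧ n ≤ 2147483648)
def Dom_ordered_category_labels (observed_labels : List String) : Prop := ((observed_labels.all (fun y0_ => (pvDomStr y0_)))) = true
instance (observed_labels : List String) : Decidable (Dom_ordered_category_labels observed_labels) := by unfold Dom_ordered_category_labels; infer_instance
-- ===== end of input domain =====

-- B replaces A's two-phase build (loop over the fixed order, then append the sorted leftovers)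
-- by a single sort of the combined set under a composite string key; objective: simpler decomposition.

-- ===== PORT A =====
def DEFAULT_CATEGORY_ORDER : List String :=
  ["Social/Casual", "Philosophy/Meta", "Builder/Technical", "Creative", "Spam/Low-Signal", "Other"]

def REQUIRED_KEY_CATEGORIES : List String := ["Social/Casual", "Philosophy/Meta"]

-- literal port of A ('isinstance(label, str)' is always true under the type convention)
def ordered_category_labels (observed_labels : List String) : List String :=
  let observed : PySem.Set String :=
    PySem.Set.ofList (observed_labels.filter (fun label => PySem.Str.strip label != ""))
  let out : List String :=
    DEFAULT_CATEGORY_ORDER.foldl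
      (fun out label =>
        if PySem.Set.contains observed label || REQUIRED_KEY_CATEGORIES.contains label
        then out ++ [label] else out) []
  out ++ PySem.List.sorted (PySem.Set.diff observed out) (fun x => x)

-- ===== PORT B =====
-- rank = {cat: i for i, cat in enumerate(DEFAULT_CATEGORY_ORDER)}
def pvRank : PySem.Dict String Int :=
  (PySem.List.enumerate DEFAULT_CATEGORY_ORDER).foldl (fun d ic => d.insert ic.2 ic.1) (PySem.Dict.empty : PySem.Dict String Int)

-- key=lambda l: "0%d" % rank[l] if l in rank else "1" + l
def pvKey (l : String) : String :=
  match PySem.Dict.get? pvRank l with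
  | some i => "0" ++ PySem.Int.toStr i
  | none => "1" ++ l

def ordered_category_labels_alt (observed_labels : List String) : List String :=
  let observed : PySem.Set String :=
    PySem.Set.ofList (observed_labels.filter (fun label => PySem.Str.strip label != ""))
  let full : PySem.Set String :=
    PySem.Set.union observed (PySem.Set.ofList REQUIRED_KEY_CATEGORIES)
  PySem.List.sorted full pvKey

-- ===== PRECONDITION & SPEC =====
def Spec_ordered_category_labels (observed_labels : List String) (out : List String) : Prop := out = ordered_category_labels_alt observed_labels
instance (observed_labels : List String) (out : List String) : Decidable (Spec_ordered_category_labels observed_labels out) := by unfold Spec_ordered_category_labels; infer_instance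

-- ===== CLAIM (what is proved, stated in full; the proofs are below) =====
def Claim_equal_ordered_category_labels : Prop := ∀ (observed_labels : List String), Dom_ordered_category_labels observed_labels → Spec_ordered_category_labels observed_labels (ordered_category_labels observed_labels)

-- ===== LEMMAS AND PROOFS =====

-- small facts about the fixed category tables
theorem pv_default_nodup : DEFAULT_CATEGORY_ORDER.Nodup := by decide

theorem pv_req_sub_default : ∀ x ∈ REQUIRED_KEY_CATEGORIES, x ∈ DEFAULT_CATEGORY_ORDER := by decide

theorem pvRank_keys : (pvRank).keys = DEFAULT_CATEGORY_ORDER := by rfl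

theorem pvKey_of_not_mem (b : String) (hb : b ∉ DEFAULT_CATEGORY_ORDER) : pvKey b = "1" ++ b := by
  unfold pvKey
  have h : PySem.Dict.get? pvRank b = none := by
    rw [PySem.Dict.get?_eq_none_iff_not_mem_keys, pvRank_keys]; exact hb
  rw [h]

theorem pv_append1_lt (a b : String) (h : a < b) : "1" ++ a < "1" ++ b := by
  rw [String.lt_iff_toList_lt] at h ⊢
  simp only [String.toList_append]
  have : ("1" : String).toList = ['1'] := rfl
  rw [this]
  exact List.cons_lt_cons_iff.mpr (Or.inr ⟨rfl, h⟩)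

theorem pv_zero_lt_one (k b : String) (h : k.toList.head? = some '0') : k < "1" ++ b := by
  rw [String.lt_iff_toList_lt, String.toList_append]
  rcases hx : k.toList with _ | ⟨c, t⟩
  · rw [hx] at h; exact absurd h (by simp)
  · rw [hx] at h
    have hc : c = '0' := by simpa using h
    subst hc
    exact List.cons_lt_cons_iff.mpr (Or.inl (by decide))

theorem pvKey_default_head : ∀ a ∈ DEFAULT_CATEGORY_ORDER, (pvKey a).toList.head? = some '0' := by
  decide

theorem pv_key_cross (a b : String) (ha : a ∈ DEFAULT_CATEGORY_ORDER) (hb : b ∉ DEFAULT_CATEGORY_ORDER) :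
    pvKey a < pvKey b := by
  rw [pvKey_of_not_mem b hb]
  exact pv_zero_lt_one _ b (pvKey_default_head a ha)

theorem pv_main (O : PySem.Set String) (hOn : List.Nodup O) :
    (DEFAULT_CATEGORY_ORDER.filter (fun l => PySem.Set.contains O l || REQUIRED_KEY_CATEGORIES.contains l))
      ++ PySem.List.sorted (PySem.Set.diff O (DEFAULT_CATEGORY_ORDER.filter (fun l => PySem.Set.contains O l || REQUIRED_KEY_CATEGORIES.contains l))) (fun x => x)
    = PySem.List.sorted (PySem.Set.union O (PySem.Set.ofList REQUIRED_KEY_CATEGORIES)) pvKey := by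
  set p : String → Bool := fun l => PySem.Set.contains O l || REQUIRED_KEY_CATEGORIES.contains l with hp
  set knowns : List String := DEFAULT_CATEGORY_ORDER.filter p with hk
  have hpP : ∀ x, p x = true ↔ (x ∈ O ∨ x ∈ REQUIRED_KEY_CATEGORIES) := by
    intro x
    simp [hp, PySem.Set.contains]
  have hknown_mem : ∀ x, x ∈ knowns ↔ x ∈ DEFAULT_CATEGORY_ORDER ∧ (x ∈ O ∨ x ∈ REQUIRED_KEY_CATEGORIES) := by
    intro x
    rw [hk, List.mem_filter, hpP]
  have hrest_not_default : ∀ b, b ∈ PySem.Set.diff O knowns → b ∉ DEFAULT_CATEGORY_ORDER := by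
    intro b hb hbd
    rw [PySem.Set.mem_diff] at hb
    exact hb.2 ((hknown_mem b).mpr ⟨hbd, Or.inl hb.1⟩)
  have hkn : knowns.Nodup := pv_default_nodup.filter p
  have hdn : (PySem.Set.diff O knowns).Nodup := PySem.Set.nodup_diff O knowns hOn
  have hrestperm : (PySem.List.sorted (PySem.Set.diff O knowns) (fun x => x)).Perm (PySem.Set.diff O knowns) :=
    PySem.List.sorted_perm _ _ _
  apply Eq.symm
  apply PySem.List.sorted_eq_of_perm_of_pairwise_lt
  · -- permutation with the combined set
    refine (List.Perm.append_left knowns hrestperm).trans ?_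
    refine (List.perm_ext_iff_of_nodup ?_ ?_).mpr ?_
    · exact hkn.append hdn (fun a ha hb => ((PySem.Set.mem_diff O knowns a).mp hb).2 ha)
    · exact PySem.Set.nodup_union O (PySem.Set.ofList REQUIRED_KEY_CATEGORIES) hOn
    · intro x
      have hs := pv_req_sub_default x
      by_cases hd : x ∈ DEFAULT_CATEGORY_ORDER <;>
        simp only [List.mem_append, hknown_mem, PySem.Set.mem_diff, PySem.Set.mem_union,
          PySem.Set.mem_ofList] <;> tauto
  · -- strictly increasing under the composite key
    rw [List.pairwise_append]
    refine ⟨?_, ?_, ?_⟩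
    · have hdp : DEFAULT_CATEGORY_ORDER.Pairwise (fun a b => pvKey a < pvKey b) := by
        simp only [String.lt_iff_toList_lt]
        decide
      exact List.Pairwise.sublist (List.filter_sublist) hdp
    · have hle := PySem.List.sorted_pairwise (PySem.Set.diff O knowns) (fun x => x)
      have hrn : (PySem.List.sorted (PySem.Set.diff O knowns) (fun x => x)).Nodup :=
        (hrestperm.nodup_iff).mpr hdn
      refine (hle.and hrn).imp_of_mem ?_
      intro a b ha hb hab
      have hna : a ∉ DEFAULT_CATEGORY_ORDER :=
        hrest_not_default a (hrestperm.mem_iff.mp ha)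
      have hnb : b ∉ DEFAULT_CATEGORY_ORDER :=
        hrest_not_default b (hrestperm.mem_iff.mp hb)
      rw [pvKey_of_not_mem a hna, pvKey_of_not_mem b hnb]
      exact pv_append1_lt a b (lt_of_le_of_ne hab.1 hab.2)
    · intro a ha b hb
      exact pv_key_cross a b ((hknown_mem a).mp ha).1
        (hrest_not_default b (hrestperm.mem_iff.mp hb))

theorem ordered_category_labels_eq (observed_labels : List String) :
    ordered_category_labels observed_labels = ordered_category_labels_alt observed_labels := by
  unfold ordered_category_labels ordered_category_labels_alt
  simp only [PySem.List.foldl_append_if_eq_filter, List.nil_append]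
  exact pv_main _ (PySem.Set.nodup_ofList _)

-- ===== VERDICT (by name: the statement is the Claim_ definition above) =====
theorem ordered_category_labels_spec : Claim_equal_ordered_category_labels := by
  intro xs _
  unfold Spec_ordered_category_labels
  exact ordered_category_labels_eq xs
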